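-- pv_equiv track=rewrite | github.com/satwik77/Transformer-Formal-Languages | src/utils/reset_dyck_generator.py | output_generator
-- ===== SOURCE A (Python) =====
-- from collections import defaultdict, Counter
--
-- def output_generator (seq):
-- 	start_id = 0
-- 	out_seq = ''
-- 	for i,ch in enumerate(seq):
-- 		if ch != '1':
-- 			substr = seq[start_id:i+1]
-- 			counter = Counter(substr)
-- 			if counter['('] - counter[')'] > 0:
-- 				out_seq += '1'
-- 			else:
-- 				out_seq += '0'
-- 		else:
-- 			out_seq += '0'
-- 			start_id = i+1
-- 	return out_seq
-- ===== SOURCE B (Python) =====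
-- def output_generator(seq):
--     out = []
--     bal = 0
--     for ch in seq:
--         if ch == '1':
--             out.append('0')
--             bal = 0
--         else:
--             if ch == '(':
--                 bal += 1
--             elif ch == ')':
--                 bal -= 1
--             out.append('1' if bal > 0 else '0')
--     return ''.join(out)
-- ===== Notes on version B (the rewrite author's own statement) =====
-- stated objective: faster
-- what changed: B keeps a running '(' minus ')' balance that resets to 0 at each '1', emitting one char per position in a single pass, instead of re-slicing and re-counting the whole segment with Counter at every position.
import Mathlib
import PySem

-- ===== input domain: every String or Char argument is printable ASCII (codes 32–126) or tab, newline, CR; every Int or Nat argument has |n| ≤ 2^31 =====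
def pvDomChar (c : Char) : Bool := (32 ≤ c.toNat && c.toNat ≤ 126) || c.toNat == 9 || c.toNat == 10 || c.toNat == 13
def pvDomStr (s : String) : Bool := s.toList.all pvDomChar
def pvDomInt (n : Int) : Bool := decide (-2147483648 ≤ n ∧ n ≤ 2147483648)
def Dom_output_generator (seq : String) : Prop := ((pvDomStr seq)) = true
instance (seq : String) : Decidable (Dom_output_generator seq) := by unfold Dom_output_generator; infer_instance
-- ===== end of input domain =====

-- B replaces A's per-position slice + Counter recount with a single pass keeping a
-- running '(' minus ')' balance reset at each '1' (objective: faster, asymptotic).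

-- ===== PORT A =====
-- A's loop step: state (start_id, out_seq); slices seq[start_id:i+1] and counts with Counter.
def outGenStepA (cs : List Char) (st : Int × List Char) (p : Int × Char) : Int × List Char :=
  if p.2 ≠ '1' then
    let substr := PySem.List.slice cs (some st.1) (some (p.1 + 1))
    let counter := PySem.Dict.counter substr
    if counter.getD '(' 0 - counter.getD ')' 0 > 0 then (st.1, st.2 ++ ['1'])
    else (st.1, st.2 ++ ['0'])
  else (p.1 + 1, st.2 ++ ['0'])

def output_generator (seq : String) : String :=
  String.ofList
    (((PySem.List.enumerate seq.toList 0).foldl (outGenStepA seq.toList)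
      ((0 : Int), ([] : List Char))).2)

-- ===== PORT B =====
-- B's loop: running balance, reset at '1', one output char per input char.
def outGenGoB : List Char → Int → List Char
  | [], _ => []
  | c :: rest, bal =>
    if c = '1' then '0' :: outGenGoB rest 0
    else
      let bal' := bal + (if c = '(' then 1 else if c = ')' then -1 else 0)
      (if bal' > 0 then '1' else '0') :: outGenGoB rest bal'

def output_generator_alt (seq : String) : String :=
  String.ofList (outGenGoB seq.toList 0)

-- ===== PRECONDITION & SPEC =====
def Spec_output_generator (seq : String) (out : String) : Prop := out = output_generator_alt seq
instance (seq : String) (out : String) : Decidable (Spec_output_generator seq out) := by unfold Spec_output_generator; infer_instance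

-- ===== CLAIM (what is proved, stated in full; the proofs are below) =====
def Claim_equal_output_generator : Prop := ∀ (seq : String), Dom_output_generator seq → Spec_output_generator seq (output_generator seq)

-- ===== LEMMAS AND PROOFS =====

-- paren balance of a segment
def pvBal (l : List Char) : Int := (l.count '(' : Int) - (l.count ')' : Int)

theorem pvBal_nil : pvBal [] = 0 := rfl

theorem pvBal_append_singleton (l : List Char) (c : Char) :
    pvBal (l ++ [c]) = pvBal l + (if c = '(' then 1 else if c = ')' then -1 else 0) := by
  simp [pvBal, List.count_append, List.count_singleton]
  by_cases h1 : c = '(' <;> by_cases h2 : c = ')' <;> simp_all <;> ring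

-- extending the slice by the next character
theorem slice_snoc (pre rest : List Char) (c : Char) (s : Nat) (hs : s ≤ pre.length) :
    PySem.List.slice (pre ++ c :: rest) (some (s : Int)) (some ((pre.length : Int) + 1))
      = PySem.List.slice (pre ++ c :: rest) (some (s : Int)) (some (pre.length : Int)) ++ [c] := by
  have h1 : ((pre.length : Int) + 1) = ((pre.length + 1 : Nat) : Int) := by push_cast; ring
  rw [h1, PySem.List.slice_natCast, PySem.List.slice_natCast,
      List.drop_append_of_le_length hs]
  have h2 : (pre.drop s).length = pre.length - s := List.length_drop ..
  rw [List.take_append, List.take_append, h2,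
      List.take_of_length_le (l := pre.drop s) (by omega),
      List.take_of_length_le (l := pre.drop s) (by omega)]
  have h4 : pre.length + 1 - s - (pre.length - s) = 1 := by omega
  have h5 : pre.length - s - (pre.length - s) = 0 := by omega
  rw [h4, h5]
  simp

-- the slice from s to the current position, empty when the bounds meet
theorem slice_self (cs : List Char) (n : Nat) :
    PySem.List.slice cs (some (n : Int)) (some (n : Int)) = [] := by
  rw [PySem.List.slice_natCast]; simp

-- main invariant: folding A's step over the remaining enumerated suffix, with start index s
-- and the balance of cs[s:|pre|] fed to B's loop, produces the same appended output.
theorem main_inv (cs : List Char) :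
    ∀ (suf pre : List Char) (s : Nat) (out : List Char),
    cs = pre ++ suf → s ≤ pre.length →
    ((PySem.List.enumerate suf (pre.length : Int)).foldl (outGenStepA cs) ((s : Int), out)).2
      = out ++ outGenGoB suf (pvBal (PySem.List.slice cs (some (s : Int)) (some (pre.length : Int)))) := by
  intro suf
  induction suf with
  | nil => intro pre s out _ _; simp [PySem.List.enumerate, outGenGoB]
  | cons c rest ih =>
    intro pre s out hcs hs
    rw [PySem.List.enumerate_cons, List.foldl_cons]
    by_cases h1 : c = '1'
    · -- reset branch
      have hstep : outGenStepA cs ((s : Int), out) ((pre.length : Int), c)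
          = ((pre.length : Int) + 1, out ++ ['0']) := by
        simp [outGenStepA, h1]
      rw [hstep]
      have hcs' : cs = (pre ++ [c]) ++ rest := by simp [hcs]
      have key := ih (pre ++ [c]) (pre.length + 1) (out ++ ['0']) hcs' (by simp)
      have hz := slice_self cs (pre.length + 1)
      simp only [List.length_append, List.length_cons, List.length_nil, Nat.cast_add,
        Nat.cast_one, zero_add] at key hz
      rw [hz, pvBal_nil] at key
      rw [key]
      simp [outGenGoB, h1]
    · -- non-'1' branch
      have hslice := slice_snoc pre rest c s hs
      rw [← hcs] at hslice
      have hbal : pvBal (PySem.List.slice cs (some (s : Int)) (some ((pre.length : Int) + 1)))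
          = pvBal (PySem.List.slice cs (some (s : Int)) (some (pre.length : Int)))
            + (if c = '(' then 1 else if c = ')' then -1 else 0) := by
        rw [hslice, pvBal_append_singleton]
      have hstep : outGenStepA cs ((s : Int), out) ((pre.length : Int), c)
          = ((s : Int), out ++
              [if 0 < pvBal (PySem.List.slice cs (some (s : Int)) (some ((pre.length : Int) + 1)))
               then '1' else '0']) := by
        by_cases hp : 0 < pvBal (PySem.List.slice cs (some (s : Int)) (some ((pre.length : Int) + 1)))
        · have hp' : (PySem.List.slice cs (some (s : Int)) (some ((pre.length : Int) + 1))).count ')'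
              < (PySem.List.slice cs (some (s : Int)) (some ((pre.length : Int) + 1))).count '(' := by
            simp only [pvBal] at hp; omega
          simp [outGenStepA, h1, PySem.Dict.getD_counter, hp, hp']
        · have hp' : ¬ ((PySem.List.slice cs (some (s : Int)) (some ((pre.length : Int) + 1))).count ')'
              < (PySem.List.slice cs (some (s : Int)) (some ((pre.length : Int) + 1))).count '(') := by
            simp only [pvBal] at hp; omega
          simp [outGenStepA, h1, PySem.Dict.getD_counter, hp, hp']
      rw [hstep]
      have hcs' : cs = (pre ++ [c]) ++ rest := by simp [hcs]
      have key := ih (pre ++ [c]) s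
        (out ++ [if 0 < pvBal (PySem.List.slice cs (some (s : Int)) (some ((pre.length : Int) + 1)))
                 then '1' else '0']) hcs' (by simp; omega)
      simp only [List.length_append, List.length_cons, List.length_nil, Nat.cast_add,
        Nat.cast_one, zero_add] at key
      rw [key, hbal]
      simp [outGenGoB, h1]

-- ===== VERDICT (by name: the statement is the Claim_ definition above) =====
theorem output_generator_spec : Claim_equal_output_generator := by
  intro seq _
  unfold Spec_output_generator output_generator output_generator_alt
  have key := main_inv seq.toList seq.toList [] 0 [] (by simp) (by simp)
  have hz := slice_self seq.toList 0
  simp only [List.length_nil, Nat.cast_zero, List.nil_append] at key hz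
  rw [hz, pvBal_nil] at key
  rw [key]
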